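-- pv_equiv track=rewrite | github.com/Mr-Donot/QueensGame | test.py | are_grids_same
-- ===== SOURCE A (Python) =====
-- def are_grids_same(g1, g2):
--
--     if len(g1) != len(g2):
--         return False
--     d1 = {}
--     d2 = {}
--
--     for i in range(len(g1)):
--         for j in range(len(g1)):
--             v1 = g1[i][j]
--             v2 = g2[i][j]
--             if v1 not in d1:
--                 d1[v1] = [[i,j]]
--             else:
--                 d1[v1].append([i,j])
--             if v2 not in d2:
--                 d2[v2] = [[i,j]]
--             else:
--                 d2[v2].append([i,j])
--
--     a1 = []
--     a2 = []
--     for k1, k2 in zip(d1, d2):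
--         a1.append(d1[k1])
--         a2.append(d2[k2])
--
--     a1.sort()
--     a2.sort()
--
--     return a1 == a2
-- ===== SOURCE B (Python) =====
-- def are_grids_same(g1, g2):
--     if len(g1) != len(g2):
--         return False
--
--     def normalize(g):
--         ids = {}
--         out = []
--         for i in range(len(g1)):
--             row = []
--             for j in range(len(g1)):
--                 v = g[i][j]
--                 if v not in ids:
--                     ids[v] = len(ids)
--                 row.append(ids[v])
--             out.append(row)
--         return out
--
--     return normalize(g1) == normalize(g2)
-- ===== Notes on version B (the rewrite author's own statement) =====
-- stated objective: simpler
-- what changed: B normalizes each grid once by assigning labels sequential first-occurrence ids and compares the two normalized grids cellwise, instead of A's building per-label position-list dicts, zipping their keys, sorting both lists of position lists and comparing them.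
import Mathlib
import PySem

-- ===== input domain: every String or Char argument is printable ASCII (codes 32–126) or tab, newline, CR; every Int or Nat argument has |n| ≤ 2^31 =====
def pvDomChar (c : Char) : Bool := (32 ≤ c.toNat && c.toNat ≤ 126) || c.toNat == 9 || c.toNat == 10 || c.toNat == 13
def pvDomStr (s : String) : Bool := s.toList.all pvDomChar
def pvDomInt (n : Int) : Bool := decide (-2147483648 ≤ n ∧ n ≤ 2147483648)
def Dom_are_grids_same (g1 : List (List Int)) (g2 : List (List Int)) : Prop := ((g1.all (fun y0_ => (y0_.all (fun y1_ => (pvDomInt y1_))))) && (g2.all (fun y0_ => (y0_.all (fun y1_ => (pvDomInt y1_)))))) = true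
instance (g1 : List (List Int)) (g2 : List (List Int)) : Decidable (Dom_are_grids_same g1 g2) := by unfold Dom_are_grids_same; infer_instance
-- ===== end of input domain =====

-- B normalizes each grid to first-occurrence sequential ids and compares cellwise,
-- replacing A's build-position-groups / sort / compare pipeline (objective: simpler).

-- ===== PORT A =====
def are_grids_same (g1 : List (List Int)) (g2 : List (List Int)) : Bool :=
  if PySem.List.len g1 ≠ PySem.List.len g2 then false
  else
    let dd := (PySem.List.pyRange 0 (PySem.List.len g1)).foldl (fun dd i =>
      (PySem.List.pyRange 0 (PySem.List.len g1)).foldl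
        (fun (dd : PySem.Dict Int (List (List Int)) × PySem.Dict Int (List (List Int))) j =>
          let v1 := PySem.List.pyGetD (PySem.List.pyGetD g1 i []) j 0
          let v2 := PySem.List.pyGetD (PySem.List.pyGetD g2 i []) j 0
          let d1 := if ¬ dd.1.contains v1 then dd.1.insert v1 [[i, j]]
                    else dd.1.insert v1 (dd.1.getD v1 [] ++ [[i, j]])
          let d2 := if ¬ dd.2.contains v2 then dd.2.insert v2 [[i, j]]
                    else dd.2.insert v2 (dd.2.getD v2 [] ++ [[i, j]])
          (d1, d2)) dd)
      (PySem.Dict.empty, PySem.Dict.empty)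
    let aa := (dd.1.keys.zip dd.2.keys).foldl
      (fun (aa : List (List (List Int)) × List (List (List Int))) kk =>
        (aa.1 ++ [dd.1.getD kk.1 []], aa.2 ++ [dd.2.getD kk.2 []])) ([], [])
    let a1 := PySem.List.sorted aa.1 (fun x => x)
    let a2 := PySem.List.sorted aa.2 (fun x => x)
    a1 == a2

-- ===== PORT B =====
-- helper `normalize` of Source B (closure over g1's length)
def pvNormalize (g1 : List (List Int)) (g : List (List Int)) : List (List Int) :=
  ((PySem.List.pyRange 0 (PySem.List.len g1)).foldl (fun (st : PySem.Dict Int Int × List (List Int)) i =>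
      let inner := (PySem.List.pyRange 0 (PySem.List.len g1)).foldl
        (fun (st2 : PySem.Dict Int Int × List Int) j =>
          let v := PySem.List.pyGetD (PySem.List.pyGetD g i []) j 0
          let ids := if ¬ st2.1.contains v then st2.1.insert v (st2.1.size : Int) else st2.1
          (ids, st2.2 ++ [ids.getD v 0])) (st.1, [])
      (inner.1, st.2 ++ [inner.2])) (PySem.Dict.empty, [])).2

def are_grids_same_alt (g1 : List (List Int)) (g2 : List (List Int)) : Bool :=
  if PySem.List.len g1 ≠ PySem.List.len g2 then false
  else pvNormalize g1 g1 == pvNormalize g1 g2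

-- ===== PRECONDITION & SPEC =====
-- Pre_ excludes exactly the inputs where A raises IndexError: equal-length grids in
-- which some row (of either grid) is shorter than the grid's row count (B raises there too).
def Pre_are_grids_same (g1 : List (List Int)) (g2 : List (List Int)) : Prop :=
  g1.length = g2.length → ((∀ r ∈ g1, g1.length ≤ r.length) ∧ (∀ r ∈ g2, g1.length ≤ r.length))
instance (g1 : List (List Int)) (g2 : List (List Int)) : Decidable (Pre_are_grids_same g1 g2) := by unfold Pre_are_grids_same; infer_instance
def pvWitness_are_grids_same : List (List Int) × List (List Int) := ([[1, 1], [2, 2]], [[3, 3], [4, 5]])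

def Spec_are_grids_same (g1 : List (List Int)) (g2 : List (List Int)) (out : Bool) : Prop := out = are_grids_same_alt g1 g2
instance (g1 : List (List Int)) (g2 : List (List Int)) (out : Bool) : Decidable (Spec_are_grids_same g1 g2 out) := by unfold Spec_are_grids_same; infer_instance

-- ===== CLAIM (what is proved, stated in full; the proofs are below) =====
def Claim_equal_are_grids_same : Prop := ∀ (g1 : List (List Int)) (g2 : List (List Int)), Dom_are_grids_same g1 g2 → Pre_are_grids_same g1 g2 → Spec_are_grids_same g1 g2 (are_grids_same g1 g2)

-- ===== LEMMAS AND PROOFS =====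

def pvP (zs : List (List Int × Int)) (v : Int) : List (List Int) :=
  (zs.filter (fun q => q.2 == v)).map Prod.fst
def pvGroups (zs : List (List Int × Int)) : List (List (List Int)) :=
  (PySem.Set.ofList (zs.map Prod.snd)).map (pvP zs)

lemma pvP_append (zs : List (List Int × Int)) (z : List Int × Int) (v : Int) :
    pvP (zs ++ [z]) v = pvP zs v ++ (if z.2 = v then [z.1] else []) := by
  by_cases h : z.2 = v <;> simp [pvP, List.filter_append, h]

lemma pvP_ne_nil (zs : List (List Int × Int)) (v : Int)
    (h : v ∈ PySem.Set.ofList (zs.map Prod.snd)) : pvP zs v ≠ [] := by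
  rw [PySem.Set.mem_ofList] at h
  obtain ⟨q, hq, hv⟩ := List.mem_map.mp h
  have : q.1 ∈ pvP zs v := by
    apply List.mem_map_of_mem
    exact List.mem_filter.mpr ⟨hq, by simp [hv]⟩
  exact List.ne_nil_of_mem this

lemma pvInv (zs : List (List Int × Int)) (h : (zs.map Prod.fst).Pairwise (· < ·)) :
    ∃ hs : List (List Int),
      (∀ x ∈ hs, x ∈ zs.map Prod.fst) ∧ hs.Pairwise (· < ·) ∧
      (pvGroups zs).map List.head? = hs.map Option.some ∧
      ((pvGroups zs).map List.length).sum = zs.length := by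
  induction zs using List.reverseRecOn with
  | nil => exact ⟨[], by simp, by simp, by simp [pvGroups], by simp [pvGroups]⟩
  | append_singleton zs z ih =>
    rw [List.map_append, List.pairwise_append] at h
    obtain ⟨h1, _, hcross⟩ := h
    obtain ⟨hs, hmem, hpw, hhead, hsum⟩ := ih h1
    have hKapp : PySem.Set.ofList ((zs ++ [z]).map Prod.snd)
        = PySem.Set.add (PySem.Set.ofList (zs.map Prod.snd)) z.2 := by
      rw [List.map_append]; exact PySem.Set.ofList_append_singleton _ _
    by_cases hz : z.2 ∈ PySem.Set.ofList (zs.map Prod.snd)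
    · -- value already seen: groups keep their heads, one group grows by one
      have hK : PySem.Set.ofList ((zs ++ [z]).map Prod.snd)
          = PySem.Set.ofList (zs.map Prod.snd) := by
        rw [hKapp, PySem.Set.add_of_mem hz]
      refine ⟨hs, ?_, hpw, ?_, ?_⟩
      · intro x hx; have := hmem x hx; simp only [List.map_append]; exact List.mem_append_left _ this
      · rw [show pvGroups (zs ++ [z]) = (PySem.Set.ofList (zs.map Prod.snd)).map (pvP (zs ++ [z])) by
          rw [pvGroups, hK]]
        rw [← hhead, pvGroups, List.map_map, List.map_map]
        apply List.map_eq_map_iff.mpr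
        intro v hv
        simp only [Function.comp_apply, pvP_append]
        exact List.head?_append_of_ne_nil _ (pvP_ne_nil zs v hv)
      · rw [show pvGroups (zs ++ [z]) = (PySem.Set.ofList (zs.map Prod.snd)).map (pvP (zs ++ [z])) by
          rw [pvGroups, hK]]
        rw [List.map_map]
        have : ((PySem.Set.ofList (zs.map Prod.snd)).map (List.length ∘ pvP (zs ++ [z])))
            = (PySem.Set.ofList (zs.map Prod.snd)).map
                (fun v => (pvP zs v).length + (if v = z.2 then 1 else 0)) := by
          apply List.map_eq_map_iff.mpr
          intro v hv
          simp only [Function.comp_apply, pvP_append, List.length_append]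
          congr 1
          by_cases hv2 : v = z.2
          · simp [hv2]
          · simp [hv2, Ne.symm hv2]
        rw [this, List.sum_map_add]
        have hcnt : ((PySem.Set.ofList (zs.map Prod.snd)).map (fun v => if v = z.2 then 1 else 0)).sum
            = (PySem.Set.ofList (zs.map Prod.snd)).count z.2 := by
          rw [PySem.List.sum_map_ite_one_zero_nat']
          rw [List.count]
          apply List.countP_congr
          intro x _
          simp
        rw [hcnt, List.count_eq_one_of_mem (PySem.Set.nodup_ofList _) hz]
        have hs1 : ((PySem.Set.ofList (zs.map Prod.snd)).map (fun v => (pvP zs v).length)).sum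
            = zs.length := by
          rw [← hsum, pvGroups, List.map_map]; rfl
        simp only [List.length_append, List.length_cons, List.length_nil]
        omega
    · -- new value: a fresh singleton group is appended
      have hK : PySem.Set.ofList ((zs ++ [z]).map Prod.snd)
          = PySem.Set.ofList (zs.map Prod.snd) ++ [z.2] := by
        rw [hKapp, PySem.Set.add_of_not_mem hz]
      have hPz : pvP (zs ++ [z]) z.2 = [z.1] := by
        rw [pvP_append]
        have : pvP zs z.2 = [] := by
          rw [pvP, List.map_eq_nil_iff, List.filter_eq_nil_iff]
          intro q hq hq2
          apply hz
          rw [PySem.Set.mem_ofList]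
          exact List.mem_map.mpr ⟨q, hq, by simpa using hq2⟩
        simp [this]
      have hGapp : pvGroups (zs ++ [z])
          = (PySem.Set.ofList (zs.map Prod.snd)).map (pvP (zs ++ [z])) ++ [[z.1]] := by
        rw [pvGroups, hK, List.map_append, List.map_singleton, hPz]
      have hGold : (PySem.Set.ofList (zs.map Prod.snd)).map (pvP (zs ++ [z]))
          = pvGroups zs := by
        rw [pvGroups]
        apply List.map_eq_map_iff.mpr
        intro v hv
        rw [pvP_append]
        have : z.2 ≠ v := fun he => hz (he ▸ hv)
        simp [this]
      refine ⟨hs ++ [z.1], ?_, ?_, ?_, ?_⟩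
      · intro x hx
        simp only [List.map_append, List.mem_append] at *
        rcases hx with hx | hx
        · exact Or.inl (hmem x hx)
        · exact Or.inr (by simpa using hx)
      · rw [List.pairwise_append]
        exact ⟨hpw, List.pairwise_singleton _ _, by
          intro a ha b hb
          simp only [List.mem_singleton] at hb
          subst hb
          exact hcross a (hmem a ha) z.1 (by simp)⟩
      · rw [hGapp, hGold, List.map_append, List.map_append, hhead]; simp
      · rw [hGapp, hGold, List.map_append, List.sum_append]
        simp [hsum]

lemma pvGroups_sum (zs : List (List Int × Int)) (h : (zs.map Prod.fst).Pairwise (· < ·)) :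
    ((pvGroups zs).map List.length).sum = zs.length :=
  (pvInv zs h).choose_spec.2.2.2

lemma pvGroups_pairwise (zs : List (List Int × Int)) (h : (zs.map Prod.fst).Pairwise (· < ·)) :
    (pvGroups zs).Pairwise (· < ·) := by
  obtain ⟨hs, _, hpw, hhead, _⟩ := pvInv zs h
  have hlen : (pvGroups zs).length = hs.length := by
    have := congrArg List.length hhead; simpa using this
  rw [List.pairwise_iff_getElem] at hpw ⊢
  intro i j hi hj hij
  have hhi : ((pvGroups zs)[i]).head? = some (hs[i]'(by omega)) := by
    have h1 := congrArg (fun l => l[i]?) hhead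
    have hi' : i < hs.length := by omega
    simp only [List.getElem?_map, List.getElem?_eq_getElem hi, List.getElem?_eq_getElem hi',
      Option.map_some] at h1
    simpa using h1
  have hhj : ((pvGroups zs)[j]).head? = some (hs[j]'(by omega)) := by
    have h1 := congrArg (fun l => l[j]?) hhead
    have hj' : j < hs.length := by omega
    simp only [List.getElem?_map, List.getElem?_eq_getElem hj, List.getElem?_eq_getElem hj',
      Option.map_some] at h1
    simpa using h1
  obtain ⟨ti, hti⟩ := List.head?_eq_some_iff.mp hhi
  obtain ⟨tj, htj⟩ := List.head?_eq_some_iff.mp hhj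
  rw [hti, htj]
  exact List.cons_lt_cons_iff.mpr (Or.inl (hpw i j (by omega) (by omega) hij))

lemma pvGroups_ne_nil (zs : List (List Int × Int)) (g : List (List Int)) (hg : g ∈ pvGroups zs) :
    g ≠ [] := by
  rw [pvGroups] at hg
  obtain ⟨v, hv, rfl⟩ := List.mem_map.mp hg
  exact pvP_ne_nil zs v hv

lemma pvSumTake (G : List (List (List Int))) (m : Nat) (hnn : ∀ g ∈ G, g ≠ []) (hm : m < G.length) :
    ((G.take m).map List.length).sum < (G.map List.length).sum := by
  conv_rhs => rw [← List.take_append_drop m G]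
  rw [List.map_append, List.sum_append]
  have hne : G.drop m ≠ [] := by
    intro hnil
    have := List.drop_eq_nil_iff.mp hnil
    omega
  obtain ⟨g, hgmem⟩ := List.exists_mem_of_ne_nil _ hne
  have hg : g ∈ G := List.mem_of_mem_drop hgmem
  have h1 : 1 ≤ g.length := by
    have := hnn g hg
    cases g with
    | nil => exact absurd rfl this
    | cons a t => simp
  have h2 : g.length ≤ ((G.drop m).map List.length).sum :=
    List.single_le_sum (by intro x _; omega) _ (List.mem_map_of_mem hgmem)
  omega

lemma pvMaster (zs : List (List Int × Int × Int))
    (h : (zs.map Prod.fst).Pairwise (· < ·)) :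
    ((pvGroups (zs.map (fun z => (z.1, z.2.1)))).take
        (min (PySem.Set.ofList (zs.map (fun z => z.2.1))).length
             (PySem.Set.ofList (zs.map (fun z => z.2.2))).length) =
     (pvGroups (zs.map (fun z => (z.1, z.2.2)))).take
        (min (PySem.Set.ofList (zs.map (fun z => z.2.1))).length
             (PySem.Set.ofList (zs.map (fun z => z.2.2))).length)
      ↔ ∀ z ∈ zs, (PySem.Set.ofList (zs.map (fun z => z.2.1))).idxOf z.2.1
                = (PySem.Set.ofList (zs.map (fun z => z.2.2))).idxOf z.2.2) := by
  set zs1 := zs.map (fun z => (z.1, z.2.1)) with hzs1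
  set zs2 := zs.map (fun z => (z.1, z.2.2)) with hzs2
  have hfst1 : zs1.map Prod.fst = zs.map Prod.fst := by rw [hzs1, List.map_map]; rfl
  have hfst2 : zs2.map Prod.fst = zs.map Prod.fst := by rw [hzs2, List.map_map]; rfl
  have hsnd1 : zs1.map Prod.snd = zs.map (fun z => z.2.1) := by rw [hzs1, List.map_map]; rfl
  have hsnd2 : zs2.map Prod.snd = zs.map (fun z => z.2.2) := by rw [hzs2, List.map_map]; rfl
  have h1 : (zs1.map Prod.fst).Pairwise (· < ·) := by rw [hfst1]; exact h
  have h2 : (zs2.map Prod.fst).Pairwise (· < ·) := by rw [hfst2]; exact h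
  set K1 := PySem.Set.ofList (zs.map (fun z => z.2.1)) with hK1
  set K2 := PySem.Set.ofList (zs.map (fun z => z.2.2)) with hK2
  have hG1 : pvGroups zs1 = K1.map (pvP zs1) := by rw [pvGroups, hsnd1]
  have hG2 : pvGroups zs2 = K2.map (pvP zs2) := by rw [pvGroups, hsnd2]
  have hN1 : K1.Nodup := PySem.Set.nodup_ofList _
  have hN2 : K2.Nodup := PySem.Set.nodup_ofList _
  have hlen1 : (pvGroups zs1).length = K1.length := by rw [hG1, List.length_map]
  have hlen2 : (pvGroups zs2).length = K2.length := by rw [hG2, List.length_map]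
  have hsum1 : ((pvGroups zs1).map List.length).sum = zs.length := by
    rw [pvGroups_sum zs1 h1, hzs1, List.length_map]
  have hsum2 : ((pvGroups zs2).map List.length).sum = zs.length := by
    rw [pvGroups_sum zs2 h2, hzs2, List.length_map]
  have hmemK1 : ∀ z ∈ zs, z.2.1 ∈ K1 := by
    intro z hz; rw [hK1, PySem.Set.mem_ofList]; exact List.mem_map_of_mem hz
  have hmemK2 : ∀ z ∈ zs, z.2.2 ∈ K2 := by
    intro z hz; rw [hK2, PySem.Set.mem_ofList]; exact List.mem_map_of_mem hz
  have hP1 : ∀ v, pvP zs1 v = (zs.filter (fun z => z.2.1 == v)).map Prod.fst := by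
    intro v; rw [hzs1, pvP, List.filter_map, List.map_map]; rfl
  have hP2 : ∀ v, pvP zs2 v = (zs.filter (fun z => z.2.2 == v)).map Prod.fst := by
    intro v; rw [hzs2, pvP, List.filter_map, List.map_map]; rfl
  -- membership of a position in a group pins down the value of that cell
  have hpin1 : ∀ z ∈ zs, ∀ v, z.1 ∈ pvP zs1 v → z.2.1 = v := by
    intro z hz v hmem
    rw [hP1] at hmem
    obtain ⟨z', hz', hz'1⟩ := List.mem_map.mp hmem
    have hz'mem := List.mem_of_mem_filter hz'
    have hz'v : z'.2.1 = v := by simpa using (List.mem_filter.mp hz').2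
    have : z' = z := List.inj_on_of_nodup_map (h.imp ne_of_lt) hz'mem hz hz'1
    rw [← this]; exact hz'v
  have hpin2 : ∀ z ∈ zs, ∀ v, z.1 ∈ pvP zs2 v → z.2.2 = v := by
    intro z hz v hmem
    rw [hP2] at hmem
    obtain ⟨z', hz', hz'1⟩ := List.mem_map.mp hmem
    have hz'mem := List.mem_of_mem_filter hz'
    have hz'v : z'.2.2 = v := by simpa using (List.mem_filter.mp hz').2
    have : z' = z := List.inj_on_of_nodup_map (h.imp ne_of_lt) hz'mem hz hz'1
    rw [← this]; exact hz'v
  have hself1 : ∀ z ∈ zs, z.1 ∈ pvP zs1 z.2.1 := by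
    intro z hz; rw [hP1]
    exact List.mem_map_of_mem (List.mem_filter.mpr ⟨hz, by simp⟩)
  have hself2 : ∀ z ∈ zs, z.1 ∈ pvP zs2 z.2.2 := by
    intro z hz; rw [hP2]
    exact List.mem_map_of_mem (List.mem_filter.mpr ⟨hz, by simp⟩)
  constructor
  · intro htake
    -- first: the two grids use the same number of labels
    have hkk : K1.length = K2.length := by
      by_contra hne
      rcases Nat.lt_or_ge K1.length K2.length with hlt | hge
      · have hmin : min K1.length K2.length = K1.length := by omega
        rw [hmin] at htake
        have htk1 : (pvGroups zs1).take K1.length = pvGroups zs1 :=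
          List.take_of_length_le (by omega)
        have := congrArg (fun l => (l.map List.length).sum) htake
        simp only [htk1] at this
        rw [hsum1] at this
        have hlt2 : (((pvGroups zs2).take K1.length).map List.length).sum
            < ((pvGroups zs2).map List.length).sum :=
          pvSumTake _ _ (fun g hg => pvGroups_ne_nil zs2 g hg) (by omega)
        rw [hsum2] at hlt2
        omega
      · have hlt : K2.length < K1.length := by omega
        have hmin : min K1.length K2.length = K2.length := by omega
        rw [hmin] at htake
        have htk2 : (pvGroups zs2).take K2.length = pvGroups zs2 :=
          List.take_of_length_le (by omega)
        have := congrArg (fun l => (l.map List.length).sum) htake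
        simp only [htk2] at this
        rw [hsum2] at this
        have hlt2 : (((pvGroups zs1).take K2.length).map List.length).sum
            < ((pvGroups zs1).map List.length).sum :=
          pvSumTake _ _ (fun g hg => pvGroups_ne_nil zs1 g hg) (by omega)
        rw [hsum1] at hlt2
        omega
    have hfull : pvGroups zs1 = pvGroups zs2 := by
      have : min K1.length K2.length = K1.length := by omega
      rw [this] at htake
      rw [← List.take_of_length_le (le_of_eq hlen1), ← List.take_of_length_le (by omega : (pvGroups zs2).length ≤ K1.length)]
      exact htake
    intro z hz
    have hv1 : z.2.1 ∈ K1 := hmemK1 z hz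
    set t := K1.idxOf z.2.1 with ht
    have htlt : t < K1.length := List.idxOf_lt_length_of_mem hv1
    have hKt : K1[t]'htlt = z.2.1 := List.getElem_idxOf htlt
    have hGt1 : (pvGroups zs1)[t]'(by omega) = pvP zs1 z.2.1 := by
      simp only [hG1, List.getElem_map, hKt]
    have hz1mem : z.1 ∈ (pvGroups zs2)[t]'(by omega) := by
      simp only [← hfull, hGt1]; exact hself1 z hz
    have hGt2 : (pvGroups zs2)[t]'(by omega) = pvP zs2 (K2[t]'(by omega)) := by
      simp only [hG2, List.getElem_map]
    rw [hGt2] at hz1mem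
    have hpinned := hpin2 z hz _ hz1mem
    have h2' : K2.idxOf z.2.2 = t := by
      rw [hpinned]; exact List.Nodup.idxOf_getElem hN2 _ (by omega)
    omega
  · intro hids
    have hkk : K1.length = K2.length := by
      have hle : ∀ t, t < K1.length → t < K2.length := by
        intro t htlt
        have hxK : K1[t]'htlt ∈ zs.map (fun z => z.2.1) := by
          have h0 : K1[t]'htlt ∈ K1 := List.getElem_mem _
          rwa [PySem.Set.mem_ofList] at h0
        obtain ⟨z, hz, hzv⟩ := List.mem_map.mp hxK
        have hidx1 : K1.idxOf z.2.1 = t := by rw [hzv]; exact List.Nodup.idxOf_getElem hN1 t htlt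
        have := hids z hz
        rw [hidx1] at this
        have hmem2 := hmemK2 z hz
        have := List.idxOf_lt_length_of_mem hmem2
        omega
      have hge : ∀ t, t < K2.length → t < K1.length := by
        intro t htlt
        have hxK : K2[t]'htlt ∈ zs.map (fun z => z.2.2) := by
          have h0 : K2[t]'htlt ∈ K2 := List.getElem_mem _
          rwa [PySem.Set.mem_ofList] at h0
        obtain ⟨z, hz, hzv⟩ := List.mem_map.mp hxK
        have hidx2 : K2.idxOf z.2.2 = t := by rw [hzv]; exact List.Nodup.idxOf_getElem hN2 t htlt
        have := hids z hz
        rw [hidx2] at this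
        have hmem1 := hmemK1 z hz
        have := List.idxOf_lt_length_of_mem hmem1
        omega
      by_contra hne
      rcases Nat.lt_or_ge K1.length K2.length with hlt | hgt
      · have := hge (K2.length - 1) (by omega); omega
      · have hlt : K2.length < K1.length := by omega
        have := hle (K1.length - 1) (by omega); omega
    have hfull : pvGroups zs1 = pvGroups zs2 := by
      apply List.ext_getElem (by omega)
      intro t ht1 ht2
      simp only [hG1, hG2, List.getElem_map]
      rw [hP1, hP2]
      apply congrArg
      apply List.filter_congr
      intro z hz
      have e1 : (z.2.1 == K1[t]'(by omega)) = decide (K1.idxOf z.2.1 = t) := by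
        apply Bool.eq_iff_iff.mpr
        simp only [beq_iff_eq, decide_eq_true_eq]
        constructor
        · intro hc; rw [hc]; exact List.Nodup.idxOf_getElem hN1 t (by omega)
        · intro hidx
          subst hidx
          exact (List.getElem_idxOf (List.idxOf_lt_length_of_mem (hmemK1 z hz))).symm
      have e2 : (z.2.2 == K2[t]'(by omega)) = decide (K2.idxOf z.2.2 = t) := by
        apply Bool.eq_iff_iff.mpr
        simp only [beq_iff_eq, decide_eq_true_eq]
        constructor
        · intro hc; rw [hc]; exact List.Nodup.idxOf_getElem hN2 t (by omega)
        · intro hidx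
          subst hidx
          exact (List.getElem_idxOf (List.idxOf_lt_length_of_mem (hmemK2 z hz))).symm
      rw [e1, e2, hids z hz]
    rw [hfull]

-- the id dict after scanning values pp: label ↦ its first-occurrence rank
def pvCanon (pp : List Int) : PySem.Dict Int Int :=
  PySem.Dict.mk ((PySem.Set.ofList pp).zipIdx.map (fun p => (p.1, (p.2 : Int))))

lemma pvCanon_nil : pvCanon [] = PySem.Dict.empty := rfl

lemma pvCanon_keys (pp : List Int) : (pvCanon pp).keys = PySem.Set.ofList pp := by
  rw [pvCanon, PySem.Dict.keys_mk, List.map_map]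
  exact List.zipIdx_map_fst 0 _

lemma pvCanon_contains (pp : List Int) (v : Int) :
    (pvCanon pp).contains v = true ↔ v ∈ PySem.Set.ofList pp := by
  rw [PySem.Dict.contains_iff_mem_keys, pvCanon_keys]

lemma pvCanon_size (pp : List Int) : (pvCanon pp).size = (PySem.Set.ofList pp).length := by
  rw [pvCanon, PySem.Dict.size, List.length_map, List.length_zipIdx]

lemma pvCanon_getD (pp : List Int) (v : Int) (h : v ∈ PySem.Set.ofList pp) :
    (pvCanon pp).getD v 0 = (((PySem.Set.ofList pp).idxOf v : Nat) : Int) := by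
  apply PySem.Dict.getD_of_mem_items
  · rw [pvCanon]
    apply List.mem_map.mpr
    refine ⟨(v, (PySem.Set.ofList pp).idxOf v), ?_, rfl⟩
    apply List.mk_mem_zipIdx_iff_getElem?.mpr
    rw [List.getElem?_eq_getElem (List.idxOf_lt_length_of_mem h)]
    rw [List.getElem_idxOf]
  · rw [pvCanon_keys]
    exact PySem.Set.nodup_ofList _

lemma pvCanon_insert (pp : List Int) (v : Int) (h : v ∉ PySem.Set.ofList pp) :
    (pvCanon pp).insert v (((pvCanon pp).size : Nat) : Int) = pvCanon (pp ++ [v]) := by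
  apply PySem.Dict.ext
  rw [PySem.Dict.items_insert_of_not_contains]
  · rw [pvCanon, pvCanon, PySem.Set.ofList_append_singleton, PySem.Set.add_of_not_mem h,
      List.zipIdx_append, List.map_append]
    simp
    rw [← pvCanon, pvCanon_size]
  · rw [← Bool.not_eq_true, pvCanon_contains]
    exact h

-- index of a value is unchanged by later scanning
lemma pvIdx_stab (pp ext : List Int) (v : Int) (h : v ∈ PySem.Set.ofList pp) :
    (PySem.Set.ofList (pp ++ ext)).idxOf v = (PySem.Set.ofList pp).idxOf v := by
  rw [PySem.Set.ofList_append, PySem.Set.update_eq_append_filter]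
  exact List.idxOf_append_of_mem h

lemma pvCanon_append_mem (pp : List Int) (v : Int) (h : v ∈ PySem.Set.ofList pp) :
    pvCanon (pp ++ [v]) = pvCanon pp := by
  rw [pvCanon, pvCanon, PySem.Set.ofList_append_singleton, PySem.Set.add_of_mem h]

def pvStepV (st2 : PySem.Dict Int Int × List Int) (v : Int) : PySem.Dict Int Int × List Int :=
  let ids := if ¬ st2.1.contains v then st2.1.insert v ((st2.1.size : Nat) : Int) else st2.1
  (ids, st2.2 ++ [ids.getD v 0])

def pvStepRow (st : PySem.Dict Int Int × List (List Int)) (ws : List Int) :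
    PySem.Dict Int Int × List (List Int) :=
  let inner := ws.foldl pvStepV (st.1, [])
  (inner.1, st.2 ++ [inner.2])

lemma pvStepV_eq (pp : List Int) (acc : List Int) (v : Int) :
    pvStepV (pvCanon pp, acc) v
      = (pvCanon (pp ++ [v]), acc ++ [(((PySem.Set.ofList (pp ++ [v])).idxOf v : Nat) : Int)]) := by
  have hvmem : v ∈ PySem.Set.ofList (pp ++ [v]) := by
    rw [PySem.Set.ofList_append_singleton]
    exact (PySem.Set.mem_add _ _ _).mpr (Or.inr rfl)
  by_cases hc : (pvCanon pp).contains v = true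
  · have hv : v ∈ PySem.Set.ofList pp := (pvCanon_contains _ _).mp hc
    have hids : (if ¬ (pvCanon pp).contains v
          then (pvCanon pp).insert v (((pvCanon pp).size : Nat) : Int) else pvCanon pp)
        = pvCanon (pp ++ [v]) := by
      rw [hc]
      simp [pvCanon_append_mem pp v hv]
    rw [pvStepV, hids, pvCanon_getD _ v hvmem]
  · have hv : v ∉ PySem.Set.ofList pp := fun hm => hc ((pvCanon_contains _ _).mpr hm)
    have hids : (if ¬ (pvCanon pp).contains v
          then (pvCanon pp).insert v (((pvCanon pp).size : Nat) : Int) else pvCanon pp)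
        = pvCanon (pp ++ [v]) := by
      rw [Bool.not_eq_true] at hc
      rw [hc]
      simp [pvCanon_insert pp v hv]
    rw [pvStepV, hids, pvCanon_getD _ v hvmem]

lemma pvInnerF (ws pp : List Int) (acc : List Int) :
    ws.foldl pvStepV (pvCanon pp, acc)
    = (pvCanon (pp ++ ws),
       acc ++ ws.map (fun v => (((PySem.Set.ofList (pp ++ ws)).idxOf v : Nat) : Int))) := by
  induction ws generalizing pp acc with
  | nil => simp
  | cons v ws ih =>
    rw [List.foldl_cons, pvStepV_eq, ih]
    have hvmem : v ∈ PySem.Set.ofList (pp ++ [v]) := by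
      rw [PySem.Set.ofList_append_singleton]
      exact (PySem.Set.mem_add _ _ _).mpr (Or.inr rfl)
    have hassoc : pp ++ v :: ws = (pp ++ [v]) ++ ws := by simp
    have hstab : (PySem.Set.ofList ((pp ++ [v]) ++ ws)).idxOf v
        = (PySem.Set.ofList (pp ++ [v])).idxOf v := pvIdx_stab _ _ _ hvmem
    rw [hassoc]
    have hstab' : (PySem.Set.ofList (pp ++ v :: ws)).idxOf v
        = (PySem.Set.ofList (pp ++ [v])).idxOf v := by rw [hassoc]; exact hstab
    simp [hstab']

lemma pvOuterF (rows : List (List Int)) (pp : List Int) (acc : List (List Int)) :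
    rows.foldl pvStepRow (pvCanon pp, acc)
    = (pvCanon (pp ++ rows.flatten),
       acc ++ rows.map (fun ws =>
         ws.map (fun v => (((PySem.Set.ofList (pp ++ rows.flatten)).idxOf v : Nat) : Int)))) := by
  induction rows generalizing pp acc with
  | nil => simp
  | cons ws rows ih =>
    rw [List.foldl_cons]
    have hrow : pvStepRow (pvCanon pp, acc) ws
        = (pvCanon (pp ++ ws),
           acc ++ [ws.map (fun v => (((PySem.Set.ofList (pp ++ ws)).idxOf v : Nat) : Int))]) := by
      rw [pvStepRow, pvInnerF ws pp []]
      simp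
    rw [hrow, ih]
    have hassoc : pp ++ (ws :: rows).flatten = (pp ++ ws) ++ rows.flatten := by simp
    rw [hassoc]
    -- the head row's ids are unchanged by scanning the later rows
    have hhead : List.map (fun v => (((PySem.Set.ofList ((pp ++ ws) ++ rows.flatten)).idxOf v : Nat) : Int)) ws
        = List.map (fun v => (((PySem.Set.ofList (pp ++ ws)).idxOf v : Nat) : Int)) ws := by
      apply List.map_eq_map_iff.mpr
      intro v hv
      have hvm : v ∈ PySem.Set.ofList (pp ++ ws) := by
        rw [PySem.Set.ofList_append, PySem.Set.mem_update]
        exact Or.inr hv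
      rw [pvIdx_stab _ _ _ hvm]
    rw [List.map_cons, hhead]
    simp

def pvVal (g : List (List Int)) (c : Int × Int) : Int :=
  PySem.List.pyGetD (PySem.List.pyGetD g c.1 []) c.2 0
def pvEnc (c : Int × Int) : List Int := [c.1, c.2]
def pvCells (n : Nat) : List (Int × Int) :=
  (PySem.List.pyRange 0 (n : Int)).flatMap
    (fun i => (PySem.List.pyRange 0 (n : Int)).map (fun j => (i, j)))
def pvZS (g1 g2 : List (List Int)) (n : Nat) : List (List Int × Int × Int) :=
  (pvCells n).map (fun c => (pvEnc c, pvVal g1 c, pvVal g2 c))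

lemma pvRange_pairwise (n : Nat) :
    (PySem.List.pyRange 0 (n : Int)).Pairwise (· < ·) := by
  rw [PySem.List.pyRange_zero_natCast, List.pairwise_map]
  apply List.Pairwise.imp ?_ (List.pairwise_lt_range (n := n))
  intro a b hab
  exact_mod_cast hab

lemma pvEnc_pairwise (n : Nat) : ((pvCells n).map pvEnc).Pairwise (· < ·) := by
  rw [pvCells, List.map_flatMap]
  apply List.pairwise_flatMap.mpr
  constructor
  · intro i _
    rw [List.map_map, List.pairwise_map]
    apply List.Pairwise.imp ?_ (pvRange_pairwise n)
    intro a b hab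
    simp only [Function.comp_apply, pvEnc]
    exact List.cons_lt_cons_iff.mpr (Or.inr ⟨rfl, List.cons_lt_cons_iff.mpr (Or.inl hab)⟩)
  · apply List.Pairwise.imp ?_ (pvRange_pairwise n)
    intro a b hab x hx y hy
    rw [List.map_map] at hx hy
    obtain ⟨ja, _, rfl⟩ := List.mem_map.mp hx
    obtain ⟨jb, _, rfl⟩ := List.mem_map.mp hy
    simp only [Function.comp_apply, pvEnc]
    exact List.cons_lt_cons_iff.mpr (Or.inl hab)

lemma pvZS_fst (g1 g2 : List (List Int)) (n : Nat) :
    (pvZS g1 g2 n).map Prod.fst = (pvCells n).map pvEnc := by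
  rw [pvZS, List.map_map]; rfl

lemma pvZS_pairwise (g1 g2 : List (List Int)) (n : Nat) :
    ((pvZS g1 g2 n).map Prod.fst).Pairwise (· < ·) := by
  rw [pvZS_fst]; exact pvEnc_pairwise n

lemma pvZS_snd1 (g1 g2 : List (List Int)) (n : Nat) :
    (pvZS g1 g2 n).map (fun z => z.2.1) = (pvCells n).map (pvVal g1) := by
  rw [pvZS, List.map_map]; rfl

lemma pvZS_snd2 (g1 g2 : List (List Int)) (n : Nat) :
    (pvZS g1 g2 n).map (fun z => z.2.2) = (pvCells n).map (pvVal g2) := by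
  rw [pvZS, List.map_map]; rfl

lemma pvP_zs1 (g1 g2 : List (List Int)) (n : Nat) (v : Int) :
    pvP ((pvZS g1 g2 n).map (fun z => (z.1, z.2.1))) v
      = ((pvCells n).filter (fun c => pvVal g1 c == v)).map pvEnc := by
  rw [pvZS, pvP, List.map_map, List.filter_map, List.map_map]; rfl

lemma pvP_zs2 (g1 g2 : List (List Int)) (n : Nat) (v : Int) :
    pvP ((pvZS g1 g2 n).map (fun z => (z.1, z.2.2))) v
      = ((pvCells n).filter (fun c => pvVal g2 c == v)).map pvEnc := by
  rw [pvZS, pvP, List.map_map, List.filter_map, List.map_map]; rfl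

-- A's grouping dict, as the canonical fold
def pvDict (g : List (List Int)) (n : Nat) : PySem.Dict Int (List (List Int)) :=
  ((pvCells n).map (fun c => (pvVal g c, pvEnc c))).foldl
    (fun d p => d.modify p.1 [] (fun x => x ++ [p.2])) PySem.Dict.empty

lemma pvDict_keys (g : List (List Int)) (n : Nat) :
    (pvDict g n).keys = PySem.Set.ofList ((pvCells n).map (pvVal g)) := by
  rw [pvDict, List.foldl_map]
  rw [PySem.Dict.keys_foldl_modify_key (pvCells n) (fun c => pvVal g c) []
    (fun _ c => (fun x => x ++ [pvEnc c])) PySem.Dict.empty]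
  rw [PySem.Dict.keys_empty, PySem.Set.update_nil_left]

lemma pvDict_getD (g : List (List Int)) (n : Nat) (v : Int) :
    (pvDict g n).getD v [] = ((pvCells n).filter (fun c => pvVal g c == v)).map pvEnc := by
  rw [pvDict, PySem.Dict.getD_foldl_modify_append, PySem.Dict.getD_empty]
  rw [List.filter_map, List.map_map]
  rfl

lemma pv_foldl_pair_split {α σ τ : Type} (l : List α) (f : σ → α → σ) (g : τ → α → τ)
    (a : σ) (b : τ) :
    l.foldl (fun s x => (f s.1 x, g s.2 x)) (a, b) = (l.foldl f a, l.foldl g b) := by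
  induction l generalizing a b with
  | nil => rfl
  | cons x xs ih => simp [List.foldl_cons, ih]

lemma pv_map_fst_zip_min {α β : Type} (l1 : List α) (l2 : List β) :
    (l1.zip l2).map Prod.fst = l1.take (min l1.length l2.length) := by
  induction l1 generalizing l2 with
  | nil => simp
  | cons x xs ih =>
    cases l2 with
    | nil => simp
    | cons y ys => simp [List.zip_cons_cons, ih]

def pvStepA (g : List (List Int)) (d : PySem.Dict Int (List (List Int))) (c : Int × Int) :
    PySem.Dict Int (List (List Int)) :=
  if ¬ d.contains (pvVal g c) then d.insert (pvVal g c) [pvEnc c]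
  else d.insert (pvVal g c) (d.getD (pvVal g c) [] ++ [pvEnc c])

lemma pvStepA_eq_modify (g : List (List Int)) :
    pvStepA g = (fun d c => d.modify (pvVal g c) [] (fun x => x ++ [pvEnc c])) := by
  funext d c
  rw [pvStepA]
  by_cases hc : d.contains (pvVal g c) = true
  · rw [if_neg (by simp [hc])]
    rfl
  · rw [if_pos (by simp [hc])]
    show d.insert (pvVal g c) [pvEnc c]
        = d.insert (pvVal g c) (d.getD (pvVal g c) [] ++ [pvEnc c])
    rw [PySem.Dict.getD_of_not_contains d [] (by simpa using hc)]
    rfl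

lemma pvA_fold (g1 g2 : List (List Int)) :
    ((PySem.List.pyRange 0 (PySem.List.len g1)).foldl (fun dd i =>
      (PySem.List.pyRange 0 (PySem.List.len g1)).foldl
        (fun (dd : PySem.Dict Int (List (List Int)) × PySem.Dict Int (List (List Int))) j =>
          (if ¬ dd.1.contains (PySem.List.pyGetD (PySem.List.pyGetD g1 i []) j 0)
             then dd.1.insert (PySem.List.pyGetD (PySem.List.pyGetD g1 i []) j 0) [[i, j]]
             else dd.1.insert (PySem.List.pyGetD (PySem.List.pyGetD g1 i []) j 0)
               (dd.1.getD (PySem.List.pyGetD (PySem.List.pyGetD g1 i []) j 0) [] ++ [[i, j]]),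
           if ¬ dd.2.contains (PySem.List.pyGetD (PySem.List.pyGetD g2 i []) j 0)
             then dd.2.insert (PySem.List.pyGetD (PySem.List.pyGetD g2 i []) j 0) [[i, j]]
             else dd.2.insert (PySem.List.pyGetD (PySem.List.pyGetD g2 i []) j 0)
               (dd.2.getD (PySem.List.pyGetD (PySem.List.pyGetD g2 i []) j 0) [] ++ [[i, j]]))) dd)
      (PySem.Dict.empty, PySem.Dict.empty))
    = (pvDict g1 g1.length, pvDict g2 g1.length) := by
  show ((PySem.List.pyRange 0 ((g1.length : Nat) : Int)).foldl (fun dd i =>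
      (PySem.List.pyRange 0 ((g1.length : Nat) : Int)).foldl
        (fun (dd : PySem.Dict Int (List (List Int)) × PySem.Dict Int (List (List Int))) j =>
          (pvStepA g1 dd.1 (i, j), pvStepA g2 dd.2 (i, j))) dd)
      (PySem.Dict.empty, PySem.Dict.empty))
    = (pvDict g1 g1.length, pvDict g2 g1.length)
  have heq : (fun (dd : PySem.Dict Int (List (List Int)) × PySem.Dict Int (List (List Int)))
        (i : Int) =>
      (PySem.List.pyRange 0 ((g1.length : Nat) : Int)).foldl
        (fun (dd : PySem.Dict Int (List (List Int)) × PySem.Dict Int (List (List Int))) j =>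
          (pvStepA g1 dd.1 (i, j), pvStepA g2 dd.2 (i, j))) dd)
      = (fun dd i =>
      (((PySem.List.pyRange 0 ((g1.length : Nat) : Int)).map (fun j => (i, j))).foldl
        (fun (dd : PySem.Dict Int (List (List Int)) × PySem.Dict Int (List (List Int)))
             (c : Int × Int) =>
          (pvStepA g1 dd.1 c, pvStepA g2 dd.2 c)) dd)) := by
    funext dd i
    exact (List.foldl_map (f := fun j => ((i : Int), j))
      (g := fun (dd : PySem.Dict Int (List (List Int)) × PySem.Dict Int (List (List Int)))
            (c : Int × Int) => (pvStepA g1 dd.1 c, pvStepA g2 dd.2 c))).symm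
  rw [heq]
  rw [← List.foldl_flatMap]
  rw [show ((PySem.List.pyRange 0 ((g1.length : Nat) : Int)).flatMap
      (fun i => (PySem.List.pyRange 0 ((g1.length : Nat) : Int)).map (fun j => (i, j))))
      = pvCells g1.length from rfl]
  rw [pv_foldl_pair_split]
  rw [pvStepA_eq_modify, pvStepA_eq_modify, pvDict, pvDict, List.foldl_map, List.foldl_map]

def pvNormClosed (g : List (List Int)) (n : Nat) : List (List Int) :=
  (PySem.List.pyRange 0 (n : Int)).map (fun i => (PySem.List.pyRange 0 (n : Int)).map (fun j =>
     (((PySem.Set.ofList ((pvCells n).map (pvVal g))).idxOf (pvVal g (i, j)) : Nat) : Int)))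

lemma pvB_fold (g1 g : List (List Int)) :
    pvNormalize g1 g = pvNormClosed g g1.length := by
  show ((PySem.List.pyRange 0 ((g1.length : Nat) : Int)).foldl
      (fun (st : PySem.Dict Int Int × List (List Int)) (i : Int) =>
        let inner := (PySem.List.pyRange 0 ((g1.length : Nat) : Int)).foldl
          (fun (st2 : PySem.Dict Int Int × List Int) (j : Int) =>
            pvStepV st2 (pvVal g (i, j))) (st.1, [])
        (inner.1, st.2 ++ [inner.2])) (PySem.Dict.empty, [])).2
    = pvNormClosed g g1.length
  have hrowfun : (fun (st : PySem.Dict Int Int × List (List Int)) (i : Int) =>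
        let inner := (PySem.List.pyRange 0 ((g1.length : Nat) : Int)).foldl
          (fun (st2 : PySem.Dict Int Int × List Int) (j : Int) =>
            pvStepV st2 (pvVal g (i, j))) (st.1, [])
        (inner.1, st.2 ++ [inner.2]))
      = (fun st i => pvStepRow st
          ((PySem.List.pyRange 0 ((g1.length : Nat) : Int)).map (fun j => pvVal g (i, j)))) := by
    funext st i
    rw [pvStepRow]
    rw [List.foldl_map (f := fun j => pvVal g (i, j)) (g := pvStepV)]
  rw [hrowfun]
  rw [show (fun (st : PySem.Dict Int Int × List (List Int)) (i : Int) => pvStepRow st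
        ((PySem.List.pyRange 0 ((g1.length : Nat) : Int)).map (fun j => pvVal g (i, j))))
      = (fun st i => pvStepRow st
        ((fun i => (PySem.List.pyRange 0 ((g1.length : Nat) : Int)).map (fun j => pvVal g (i, j))) i))
    from rfl]
  rw [← List.foldl_map (f := fun i => (PySem.List.pyRange 0 ((g1.length : Nat) : Int)).map
      (fun j => pvVal g (i, j))) (g := pvStepRow)]
  rw [← pvCanon_nil, pvOuterF]
  have hflat : ((PySem.List.pyRange 0 ((g1.length : Nat) : Int)).map
      (fun i => (PySem.List.pyRange 0 ((g1.length : Nat) : Int)).map (fun j => pvVal g (i, j)))).flatten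
      = (pvCells g1.length).map (pvVal g) := by
    rw [← List.flatMap_def, pvCells, List.map_flatMap]
    apply List.flatMap_congr
    intro i _
    rw [List.map_map]
    rfl
  rw [hflat]
  simp only [List.nil_append]
  rw [pvNormClosed, List.map_map]
  apply List.map_eq_map_iff.mpr
  intro i _
  simp only [Function.comp_apply, List.map_map]
  rfl

lemma pv_map_snd_zip_min {α β : Type} (l1 : List α) (l2 : List β) :
    (l1.zip l2).map Prod.snd = l2.take (min l1.length l2.length) := by
  induction l1 generalizing l2 with
  | nil => simp
  | cons x xs ih =>
    cases l2 with
    | nil => simp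
    | cons y ys => simp [List.zip_cons_cons, ih]

lemma pvAA_fold (g1 g2 : List (List Int)) (n : Nat) :
    (((pvDict g1 n).keys.zip (pvDict g2 n).keys).foldl
      (fun (aa : List (List (List Int)) × List (List (List Int))) kk =>
        (aa.1 ++ [(pvDict g1 n).getD kk.1 []], aa.2 ++ [(pvDict g2 n).getD kk.2 []])) ([], []))
    = ((pvGroups ((pvZS g1 g2 n).map (fun z => (z.1, z.2.1)))).take
         (min (PySem.Set.ofList ((pvCells n).map (pvVal g1))).length
              (PySem.Set.ofList ((pvCells n).map (pvVal g2))).length),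
       (pvGroups ((pvZS g1 g2 n).map (fun z => (z.1, z.2.2)))).take
         (min (PySem.Set.ofList ((pvCells n).map (pvVal g1))).length
              (PySem.Set.ofList ((pvCells n).map (pvVal g2))).length)) := by
  have hsplit : (((pvDict g1 n).keys.zip (pvDict g2 n).keys).foldl
      (fun (aa : List (List (List Int)) × List (List (List Int))) kk =>
        (aa.1 ++ [(pvDict g1 n).getD kk.1 []], aa.2 ++ [(pvDict g2 n).getD kk.2 []])) ([], []))
      = (((pvDict g1 n).keys.zip (pvDict g2 n).keys).foldl
          (fun (a : List (List (List Int))) kk => a ++ [(pvDict g1 n).getD kk.1 []]) [],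
         ((pvDict g1 n).keys.zip (pvDict g2 n).keys).foldl
          (fun (a : List (List (List Int))) kk => a ++ [(pvDict g2 n).getD kk.2 []]) []) :=
    pv_foldl_pair_split ((pvDict g1 n).keys.zip (pvDict g2 n).keys)
      (fun a kk => a ++ [(pvDict g1 n).getD kk.1 []])
      (fun a kk => a ++ [(pvDict g2 n).getD kk.2 []]) [] []
  rw [hsplit]
  rw [PySem.List.foldl_append_singleton_eq_map, PySem.List.foldl_append_singleton_eq_map]
  have h1 : ((pvDict g1 n).keys.zip (pvDict g2 n).keys).map
        (fun kk => (pvDict g1 n).getD kk.1 [])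
      = (((pvDict g1 n).keys.zip (pvDict g2 n).keys).map Prod.fst).map
        (fun v => (pvDict g1 n).getD v []) := by rw [List.map_map]; rfl
  have h2 : ((pvDict g1 n).keys.zip (pvDict g2 n).keys).map
        (fun kk => (pvDict g2 n).getD kk.2 [])
      = (((pvDict g1 n).keys.zip (pvDict g2 n).keys).map Prod.snd).map
        (fun v => (pvDict g2 n).getD v []) := by rw [List.map_map]; rfl
  rw [h1, h2, pv_map_fst_zip_min, pv_map_snd_zip_min]
  have hg1 : (fun v => (pvDict g1 n).getD v [])
      = pvP ((pvZS g1 g2 n).map (fun z => (z.1, z.2.1))) := by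
    funext v; rw [pvDict_getD, pvP_zs1]
  have hg2 : (fun v => (pvDict g2 n).getD v [])
      = pvP ((pvZS g1 g2 n).map (fun z => (z.1, z.2.2))) := by
    funext v; rw [pvDict_getD, pvP_zs2]
  rw [hg1, hg2, pvDict_keys, pvDict_keys, List.map_take, List.map_take]
  rw [pvGroups, pvGroups]
  have hs1 : ((pvZS g1 g2 n).map (fun z => (z.1, z.2.1))).map Prod.snd
      = (pvCells n).map (pvVal g1) := by rw [pvZS, List.map_map, List.map_map]; rfl
  have hs2 : ((pvZS g1 g2 n).map (fun z => (z.1, z.2.2))).map Prod.snd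
      = (pvCells n).map (pvVal g2) := by rw [pvZS, List.map_map, List.map_map]; rfl
  rw [hs1, hs2]
  simp

lemma pvNormClosed_eq_iff (g1 g2 : List (List Int)) (n : Nat) :
    (pvNormClosed g1 n = pvNormClosed g2 n) ↔
      (∀ z ∈ pvZS g1 g2 n,
        (PySem.Set.ofList ((pvZS g1 g2 n).map (fun z => z.2.1))).idxOf z.2.1
          = (PySem.Set.ofList ((pvZS g1 g2 n).map (fun z => z.2.2))).idxOf z.2.2) := by
  rw [pvZS_snd1, pvZS_snd2, pvNormClosed, pvNormClosed]
  constructor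
  · intro h z hz
    obtain ⟨c, hc, rfl⟩ := List.mem_map.mp hz
    rw [pvCells] at hc
    obtain ⟨i, hi, hc2⟩ := List.mem_flatMap.mp hc
    obtain ⟨j, hj, rfl⟩ := List.mem_map.mp hc2
    have h1 := List.map_eq_map_iff.mp h i hi
    have h2 := List.map_eq_map_iff.mp h1 j hj
    exact_mod_cast h2
  · intro h
    apply List.map_eq_map_iff.mpr
    intro i hi
    apply List.map_eq_map_iff.mpr
    intro j hj
    have hcell : (i, j) ∈ pvCells n := by
      rw [pvCells]
      exact List.mem_flatMap.mpr ⟨i, hi, List.mem_map.mpr ⟨j, hj, rfl⟩⟩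
    have := h ((fun c => (pvEnc c, pvVal g1 c, pvVal g2 c)) (i, j))
      (List.mem_map.mpr ⟨(i, j), hcell, rfl⟩)
    exact_mod_cast this

lemma pvSortedTake (zs : List (List Int × Int)) (h : (zs.map Prod.fst).Pairwise (· < ·)) (m : Nat) :
    PySem.List.sorted ((pvGroups zs).take m) (fun x => x) = (pvGroups zs).take m := by
  have := PySem.List.sorted_eq_self_of_pairwise ((pvGroups zs).take m) (fun x => x)
    (((pvGroups_pairwise zs h).take).imp le_of_lt)
  convert this using 2

theorem pvCore (g1 g2 : List (List Int)) (hlen : g1.length = g2.length) :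
    are_grids_same g1 g2 = are_grids_same_alt g1 g2 := by
  have hnot : ¬ (PySem.List.len g1 ≠ PySem.List.len g2) := by
    simp [PySem.List.len, hlen]
  simp only [are_grids_same, are_grids_same_alt]
  rw [if_neg hnot, if_neg hnot]
  rw [pvA_fold g1 g2]
  rw [pvAA_fold g1 g2 g1.length]
  rw [pvB_fold g1 g1, pvB_fold g1 g2]
  have hpw1 : ((((pvZS g1 g2 g1.length).map (fun z => (z.1, z.2.1)))).map Prod.fst).Pairwise (· < ·) := by
    rw [List.map_map]; exact pvZS_pairwise g1 g2 g1.length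
  have hpw2 : ((((pvZS g1 g2 g1.length).map (fun z => (z.1, z.2.2)))).map Prod.fst).Pairwise (· < ·) := by
    rw [List.map_map]; exact pvZS_pairwise g1 g2 g1.length
  rw [pvSortedTake _ hpw1 _, pvSortedTake _ hpw2 _]
  apply Bool.eq_iff_iff.mpr
  rw [beq_iff_eq, beq_iff_eq]
  rw [pvNormClosed_eq_iff g1 g2 g1.length]
  have hm := pvMaster (pvZS g1 g2 g1.length) (pvZS_pairwise g1 g2 g1.length)
  rw [← pvZS_snd1 g1 g2 g1.length, ← pvZS_snd2 g1 g2 g1.length]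
  exact hm

-- ===== VERDICT (by name: the statement is the Claim_ definition above) =====
theorem are_grids_same_spec : Claim_equal_are_grids_same := by
  intro g1 g2 _ _
  unfold Spec_are_grids_same
  by_cases hlen : g1.length = g2.length
  · exact pvCore g1 g2 hlen
  · have h : PySem.List.len g1 ≠ PySem.List.len g2 := by
      simp only [PySem.List.len, ne_eq, Nat.cast_inj]
      exact hlen
    rw [are_grids_same, are_grids_same_alt, if_pos h, if_pos h]
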